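-- pv_equiv track=rewrite | github.com/shanmugavalli/rna-structure | src/split_analysis.py | _bucket_labels
-- ===== SOURCE A (Python) =====
-- from typing import Dict, List
--
-- def _bucket_labels(boundaries: List[int]) -> List[str]:
--     labels = []
--     lower = 1
--     for boundary in boundaries:
--         labels.append(f"{lower}-{int(boundary)}")
--         lower = int(boundary) + 1
--     labels.append(f">{boundaries[-1]}" if boundaries else "all")
--     return labels
-- ===== SOURCE B (Python) =====
-- def _bucket_labels(boundaries):
--     if not boundaries:
--         return ["all"]
--     rev = [f">{boundaries[-1]}"]
--     for i in range(len(boundaries) - 1, 0, -1):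
--         rev.append(f"{int(boundaries[i - 1]) + 1}-{int(boundaries[i])}")
--     rev.append(f"1-{int(boundaries[0])}")
--     return rev[::-1]
-- ===== Notes on version B (the rewrite author's own statement) =====
-- stated objective: alternative
-- what changed: Builds the label list back-to-front: starts from the tail ('>last') label and walks the boundaries from the right, prepending each range label whose lower bound is read from the preceding boundary, instead of A's forward loop threading a running 'lower' accumulator.
import Mathlib
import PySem

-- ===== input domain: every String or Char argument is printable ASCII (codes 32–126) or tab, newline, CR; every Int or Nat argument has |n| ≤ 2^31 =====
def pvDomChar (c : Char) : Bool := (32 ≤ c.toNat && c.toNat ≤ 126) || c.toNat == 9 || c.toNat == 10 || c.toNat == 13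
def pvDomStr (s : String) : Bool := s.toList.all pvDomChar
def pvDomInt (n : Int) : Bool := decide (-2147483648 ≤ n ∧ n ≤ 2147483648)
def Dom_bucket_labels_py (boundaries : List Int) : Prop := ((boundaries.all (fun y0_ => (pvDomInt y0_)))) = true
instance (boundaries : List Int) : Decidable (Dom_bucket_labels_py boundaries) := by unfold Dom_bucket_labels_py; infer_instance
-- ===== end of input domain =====

-- B builds the label list back-to-front (tail label first, walking boundaries from the right, reversing once) instead of A's forward loop threading a running 'lower' accumulator (alternative decomposition, same cost).


-- ===== PORT A =====
-- forward loop threading (labels, lower); final label: ">boundaries[-1]" if nonempty else "all"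
def bucket_labels_py (boundaries : List Int) : List String :=
  let st := boundaries.foldl
    (fun (st : List String × Int) boundary =>
      (st.1 ++ [PySem.Int.toStr st.2 ++ "-" ++ PySem.Int.toStr boundary], boundary + 1))
    ([], 1)
  st.1 ++ [if boundaries.isEmpty then "all"
           else ">" ++ PySem.Int.toStr (PySem.List.pyGetD boundaries (-1) 0)]

-- ===== PORT B =====
-- empty case up front; otherwise build the reversed list: tail label first, then
-- for i in range(len-1, 0, -1) append "bs[i-1]+1 - bs[i]", append "1-bs[0]", reverse.
-- (rev[::-1] is ported as List.reverse, exact by PySem.List.slice?_none_none_neg_one.)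
def bucket_labels_py_alt (boundaries : List Int) : List String :=
  match boundaries with
  | [] => ["all"]
  | b :: t =>
    let bs := b :: t
    let rev0 : List String := [">" ++ PySem.Int.toStr (PySem.List.pyGetD bs (-1) 0)]
    let rev := (PySem.List.pyRange ((bs.length : Int) - 1) 0 (-1)).foldl
      (fun rev i =>
        rev ++ [PySem.Int.toStr (PySem.List.pyGetD bs (i - 1) 0 + 1) ++ "-"
                  ++ PySem.Int.toStr (PySem.List.pyGetD bs i 0)])
      rev0
    (rev ++ ["1-" ++ PySem.Int.toStr b]).reverse

-- ===== PRECONDITION & SPEC =====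
def Spec_bucket_labels_py (boundaries : List Int) (out : List String) : Prop := out = bucket_labels_py_alt boundaries
instance (boundaries : List Int) (out : List String) : Decidable (Spec_bucket_labels_py boundaries out) := by unfold Spec_bucket_labels_py; infer_instance

-- ===== CLAIM (what is proved, stated in full; the proofs are below) =====
def Claim_equal_bucket_labels_py : Prop := ∀ (boundaries : List Int), Dom_bucket_labels_py boundaries → Spec_bucket_labels_py boundaries (bucket_labels_py boundaries)

-- ===== LEMMAS AND PROOFS =====
-- A's forward fold produces the zip-with-shifted-list labels
theorem bucket_labels_fold_eq (bs : List Int) (acc : List String) (l : Int) :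
    (bs.foldl
      (fun (st : List String × Int) boundary =>
        (st.1 ++ [PySem.Int.toStr st.2 ++ "-" ++ PySem.Int.toStr boundary], boundary + 1))
      (acc, l)).1
    = acc ++ (((l - 1) :: bs.dropLast).zip bs).map
        (fun pb => PySem.Int.toStr (pb.1 + 1) ++ "-" ++ PySem.Int.toStr pb.2) := by
  induction bs generalizing acc l with
  | nil => simp
  | cons b t ih =>
    have hl : l - 1 + 1 = l := by ring
    have hb : b + 1 - 1 = b := by ring
    cases t with
    | nil => simp [hl]
    | cons c t' =>
      rw [List.foldl_cons, ih]
      simp [List.dropLast, hl, hb]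

-- folding "append one element" over a list is init ++ map
theorem foldl_append_map {α β : Type} (l : List α) (g : α → β) (init : List β) :
    l.foldl (fun r i => r ++ [g i]) init = init ++ l.map g := by
  induction l generalizing init with
  | nil => simp
  | cons a l ih => simp [ih]

-- B's per-index labels over range(1, n) are the zip labels of adjacent boundaries
theorem map_range_zip (b : Int) (t : List Int) :
    (PySem.List.pyRange 1 (((b :: t).length : Int)) 1).map
      (fun i => PySem.Int.toStr (PySem.List.pyGetD (b :: t) (i - 1) 0 + 1) ++ "-"
                  ++ PySem.Int.toStr (PySem.List.pyGetD (b :: t) i 0))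
    = (((b :: t).dropLast.zip t)).map
        (fun pb => PySem.Int.toStr (pb.1 + 1) ++ "-" ++ PySem.Int.toStr pb.2) := by
  apply List.ext_getElem
  · simp [PySem.List.length_pyRange_one, List.length_dropLast]
  · intro k h1 h2
    have hk : k < t.length := by
      simpa [PySem.List.length_pyRange_one] using h1
    simp only [List.getElem_map, PySem.List.getElem_pyRange_one, List.getElem_zip]
    have hkd : k < (b :: t).dropLast.length := by simp [List.length_dropLast]; omega
    have e1 : PySem.List.pyGetD (b :: t) ((1 : Int) + k - 1) 0 = (b :: t).dropLast[k] := by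
      have : ((1 : Int) + k - 1) = (k : Int) := by ring
      rw [this, PySem.List.pyGetD_eq_getElem]
      · simp [List.getElem_dropLast]
      · exact Int.natCast_nonneg k
      · simp; omega
    have e2 : PySem.List.pyGetD (b :: t) ((1 : Int) + k) 0 = t[k] := by
      have : ((1 : Int) + k) = ((k + 1 : Nat) : Int) := by push_cast; ring
      rw [this, PySem.List.pyGetD_eq_getElem]
      · simp
      · exact Int.natCast_nonneg _
      · simp; omega
    rw [e1, e2]

-- ===== VERDICT (by name: the statement is the Claim_ definition above) =====
theorem bucket_labels_py_spec : Claim_equal_bucket_labels_py := by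
  intro boundaries _
  unfold Spec_bucket_labels_py bucket_labels_py bucket_labels_py_alt
  cases boundaries with
  | nil => simp
  | cons b t =>
    simp only [List.isEmpty_cons]
    rw [bucket_labels_fold_eq]
    have hrange : PySem.List.pyRange (((b :: t).length : Int) - 1) 0 (-1)
        = (PySem.List.pyRange 1 (((b :: t).length : Int)) 1).reverse := by
      have := PySem.List.pyRange_neg_one_eq_reverse (((b :: t).length : Int) - 1) 0
      simpa using this
    rw [hrange, foldl_append_map, List.map_reverse, map_range_zip]
    simp [PySem.Int.toStr]
    decide
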